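/- GENERATED by farm/mkstatement.py from design/units.tsv (unit `GifFreeMapObject`) and the Specs of Gif/Spec/*.lean — do not edit.
   THE STATEMENT of the proof unit `GifFreeMapObject`: the function `GifFreeMapObject` (13 instructions) satisfies its contract,
   given the contracts of its callees. What the names mean: ProgX/Base/Spec/Basic.lean. The theorem to prove:
   `theorem GifFreeMapObject_ok : Gif.Spec.GifFreeMapObject.Statement`. -/
import Gif.Code
import Gif.Dec.All
import Gif.Labels
import Gif.Spec.Alloc
import ProgX.Base.Spec.Heap
namespace Gif.Spec.GifFreeMapObject
open X86 X86.User Asan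

/-- The statement of unit `GifFreeMapObject`. -/
def Statement : Prop :=
  ∀ (Lay : Layout) (_hLay : Lay.hi = 0x1000000) (μ : Microarch) (_hμ : UserX.MicroOK μ) (u₀ : State)
    (_hcode : HasCodeNat Lay u₀ Gif.L.GifFreeMapObject.entry Gif.Code.code_GifFreeMapObject.nat Gif.L.GifFreeMapObject.size)
    (_h_free : ∀ (H : Heap) (rest : List Obj) (frames : List (Nat × FrameLayout)) (n : Nat), Calls Lay μ ProgX.Base.WayInv (ProgX.Base.conv u₀) ProgX.Base.L.free.entry (ProgX.Base.Spec.free.spec H rest frames n))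
    (_h_asan_load8_noabort : Asan.SmallCheck Lay μ ProgX.Base.WayInv (ProgX.Base.CodeOK u₀) [.rax, .rcx, .rdx] 8 ProgX.Base.L.__asan_load8_noabort.entry),
    ∀ (H : Heap) (rest : List Obj) (frames : List (Nat × FrameLayout)) (colors n : Nat), Calls Lay μ ProgX.Base.WayInv (ProgX.Base.conv u₀) Gif.L.GifFreeMapObject.entry (Gif.Spec.GifFreeMapObject.spec H rest frames colors n)

end Gif.Spec.GifFreeMapObject
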